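-- pv_equiv track=rewrite | github.com/Facetomyself/reverse-expert-kb | ops-assistant/checks/reconcile_projects.py | extract_runtime_hints
-- ===== SOURCE A (Python) =====
-- TOKENS = [
--     'tavily', 'exafree', 'grok', 'cliproxy', 'easyimage', 'camoufox',
--     'mailu', 'moemail', 'harbor', 'registry-ui', 'hubcmd', 'registry',
--     'proxycat', 'flaresolverr', 'anticap', 'openai', '1panel', 'derper',
--     'hysteria', 'outlook', 'nas'
-- ]
--
-- def extract_tokens(text):
--     lower = (text or '').lower()
--     hints = set()
--     for token in TOKENS:
--         if token in lower:
--             hints.add(token)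
--     return hints
--
-- def extract_runtime_hints(containers, compose_files, services):
--     hints = set()
--     for line in containers:
--         hints |= extract_tokens(line)
--     for path in compose_files:
--         hints |= extract_tokens(path)
--     for line in services:
--         hints |= extract_tokens(line)
--     return sorted(hints)
-- ===== SOURCE B (Python) =====
-- TOKENS = [
--     'tavily', 'exafree', 'grok', 'cliproxy', 'easyimage', 'camoufox',
--     'mailu', 'moemail', 'harbor', 'registry-ui', 'hubcmd', 'registry',
--     'proxycat', 'flaresolverr', 'anticap', 'openai', '1panel', 'derper',
--     'hysteria', 'outlook', 'nas'
-- ]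
--
-- _SORTED_TOKENS = sorted(TOKENS)
--
-- def extract_runtime_hints(containers, compose_files, services):
--     # One pass: lower-case every input string once, then scan the (pre-sorted)
--     # token list, keeping the tokens that occur in some string.  The result is
--     # built directly in sorted order: no sets, no final sort.
--     texts = [(x or '').lower() for x in containers + compose_files + services]
--     return [t for t in _SORTED_TOKENS if any(t in s for s in texts)]
-- ===== Notes on version B (the rewrite author's own statement) =====
-- stated objective: simpler
-- what changed: Inverted the loop nesting: instead of extracting a token-set per string and unioning sets then sorting, B lowers all strings once and filters a pre-sorted token list by 'occurs in some string', emitting the result directly in sorted order with no sets and no runtime sort.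
import Mathlib
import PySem

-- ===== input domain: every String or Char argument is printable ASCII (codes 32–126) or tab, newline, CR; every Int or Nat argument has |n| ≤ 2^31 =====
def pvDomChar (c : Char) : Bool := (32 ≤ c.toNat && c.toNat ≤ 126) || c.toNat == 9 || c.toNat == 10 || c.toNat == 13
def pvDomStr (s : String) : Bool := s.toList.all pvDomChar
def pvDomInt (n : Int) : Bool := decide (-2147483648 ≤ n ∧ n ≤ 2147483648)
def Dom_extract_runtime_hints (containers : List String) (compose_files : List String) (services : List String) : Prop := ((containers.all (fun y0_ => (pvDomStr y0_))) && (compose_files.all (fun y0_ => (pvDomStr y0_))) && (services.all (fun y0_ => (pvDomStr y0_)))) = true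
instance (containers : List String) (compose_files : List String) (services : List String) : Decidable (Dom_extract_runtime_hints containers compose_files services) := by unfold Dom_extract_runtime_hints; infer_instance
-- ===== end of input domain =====

-- B inverts A's loop nesting: lower every string once, then filter a pre-sorted token list,
-- emitting the result directly in sorted order (no sets, no runtime sort). Same results; no speed claim.

-- ===== PORT A =====
def TOKENS : List String := [
  "tavily", "exafree", "grok", "cliproxy", "easyimage", "camoufox",
  "mailu", "moemail", "harbor", "registry-ui", "hubcmd", "registry",
  "proxycat", "flaresolverr", "anticap", "openai", "1panel", "derper",
  "hysteria", "outlook", "nas"]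

-- `(text or '').lower()`: on a String argument this is just text.lower() ('' is the only falsy string)
def extract_tokens (text : String) : PySem.Set String :=
  let lower := PySem.Str.lower text
  TOKENS.foldl (fun hints token =>
    if PySem.Str.isIn token lower then PySem.Set.add hints token else hints) PySem.Set.empty

def extract_runtime_hints (containers : List String) (compose_files : List String) (services : List String) : List String :=
  let hints : PySem.Set String := PySem.Set.empty
  let hints := containers.foldl (fun h line => PySem.Set.union h (extract_tokens line)) hints
  let hints := compose_files.foldl (fun h path => PySem.Set.union h (extract_tokens path)) hints
  let hints := services.foldl (fun h line => PySem.Set.union h (extract_tokens line)) hints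
  PySem.List.sorted hints (fun x => x) false

-- ===== PORT B =====
def SORTED_TOKENS : List String := PySem.List.sorted TOKENS (fun x => x) false

def extract_runtime_hints_alt (containers : List String) (compose_files : List String) (services : List String) : List String :=
  let texts := (containers ++ compose_files ++ services).map (fun x => PySem.Str.lower x)
  SORTED_TOKENS.filter (fun t => texts.any (fun s => PySem.Str.isIn t s))

-- ===== PRECONDITION & SPEC =====
def Spec_extract_runtime_hints (containers : List String) (compose_files : List String) (services : List String) (out : List String) : Prop := out = extract_runtime_hints_alt containers compose_files services
instance (containers : List String) (compose_files : List String) (services : List String) (out : List String) : Decidable (Spec_extract_runtime_hints containers compose_files services out) := by unfold Spec_extract_runtime_hints; infer_instance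

-- ===== CLAIM (what is proved, stated in full; the proofs are below) =====
def Claim_equal_extract_runtime_hints : Prop := ∀ (containers : List String) (compose_files : List String) (services : List String), Dom_extract_runtime_hints containers compose_files services → Spec_extract_runtime_hints containers compose_files services (extract_runtime_hints containers compose_files services)

-- ===== LEMMAS AND PROOFS =====

-- membership in A's per-string token set
theorem mem_extract_tokens_aux (L : List String) (lower : String) (s : PySem.Set String) (x : String) :
    x ∈ L.foldl (fun hints token => if PySem.Str.isIn token lower then PySem.Set.add hints token else hints) s
      ↔ x ∈ s ∨ (x ∈ L ∧ PySem.Str.isIn x lower = true) := by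
  induction L generalizing s with
  | nil => simp
  | cons t ts ih =>
    simp only [List.foldl_cons, ih]
    by_cases h : PySem.Str.isIn t lower = true
    · simp only [h, if_pos]
      rw [PySem.Set.mem_add]
      constructor
      · rintro ((hx | rfl) | ⟨hm, hi⟩)
        · exact Or.inl hx
        · exact Or.inr ⟨List.mem_cons_self .., h⟩
        · exact Or.inr ⟨List.mem_cons_of_mem _ hm, hi⟩
      · rintro (hx | ⟨hm, hi⟩)
        · exact Or.inl (Or.inl hx)
        · rcases List.mem_cons.mp hm with rfl | hm
          · exact Or.inl (Or.inr rfl)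
          · exact Or.inr ⟨hm, hi⟩
    · simp only [if_neg h]
      constructor
      · rintro (hx | ⟨hm, hi⟩)
        · exact Or.inl hx
        · exact Or.inr ⟨List.mem_cons_of_mem _ hm, hi⟩
      · rintro (hx | ⟨hm, hi⟩)
        · exact Or.inl hx
        · rcases List.mem_cons.mp hm with rfl | hm
          · exact absurd hi h
          · exact Or.inr ⟨hm, hi⟩

theorem mem_extract_tokens (text : String) (x : String) :
    x ∈ extract_tokens text ↔ x ∈ TOKENS ∧ PySem.Str.isIn x (PySem.Str.lower text) = true := by
  unfold extract_tokens
  rw [mem_extract_tokens_aux]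
  simp [PySem.Set.empty]

-- membership in A's unioned accumulator
theorem mem_foldl_union (xs : List String) (s : PySem.Set String) (x : String) :
    x ∈ xs.foldl (fun h line => PySem.Set.union h (extract_tokens line)) s
      ↔ x ∈ s ∨ ∃ l ∈ xs, x ∈ extract_tokens l := by
  induction xs generalizing s with
  | nil => simp
  | cons y ys ih =>
    simp only [List.foldl_cons, ih, PySem.Set.mem_union, List.mem_cons]
    constructor
    · rintro ((hx | hx) | ⟨l, hl, hx⟩)
      · exact Or.inl hx
      · exact Or.inr ⟨y, Or.inl rfl, hx⟩
      · exact Or.inr ⟨l, Or.inr hl, hx⟩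
    · rintro (hx | ⟨l, (rfl | hl), hx⟩)
      · exact Or.inl (Or.inl hx)
      · exact Or.inl (Or.inr hx)
      · exact Or.inr ⟨l, hl, hx⟩

theorem nodup_foldl_union (xs : List String) (s : PySem.Set String) (hs : s.Nodup) :
    (xs.foldl (fun h line => PySem.Set.union h (extract_tokens line)) s).Nodup := by
  induction xs generalizing s with
  | nil => exact hs
  | cons y ys ih => exact ih _ (PySem.Set.nodup_union _ _ hs)

theorem sorted_tokens_pairwise_lt : SORTED_TOKENS.Pairwise (· < ·) := by
  have hperm := PySem.List.sorted_perm TOKENS (fun x => x) false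
  have hnd : SORTED_TOKENS.Nodup := hperm.nodup_iff.mpr (by decide)
  have hle := PySem.List.sorted_pairwise TOKENS (fun x => x)
  exact (hle.and hnd).imp (fun h => lt_of_le_of_ne h.1 h.2)

theorem extract_runtime_hints_spec' (containers compose_files services : List String) :
    extract_runtime_hints containers compose_files services
      = extract_runtime_hints_alt containers compose_files services := by
  unfold extract_runtime_hints extract_runtime_hints_alt
  apply PySem.List.sorted_eq_of_perm_of_pairwise_lt
  · -- the filtered sorted token list is a permutation of A's set of hints
    rw [List.perm_ext_iff_of_nodup]
    · intro x
      rw [List.mem_filter]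
      rw [mem_foldl_union, mem_foldl_union, mem_foldl_union]
      simp only [PySem.Set.empty, List.not_mem_nil, false_or, List.any_eq_true, List.mem_map,
        SORTED_TOKENS, PySem.List.mem_sorted, mem_extract_tokens, List.mem_append]
      constructor
      · rintro ⟨hx, s, ⟨y, hy, rfl⟩, hi⟩
        rcases hy with (hy | hy) | hy
        · exact Or.inl (Or.inl ⟨y, hy, hx, hi⟩)
        · exact Or.inl (Or.inr ⟨y, hy, hx, hi⟩)
        · exact Or.inr ⟨y, hy, hx, hi⟩
      · rintro ((⟨y, hy, hx, hi⟩ | ⟨y, hy, hx, hi⟩) | ⟨y, hy, hx, hi⟩)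
        · exact ⟨hx, _, ⟨y, Or.inl (Or.inl hy), rfl⟩, hi⟩
        · exact ⟨hx, _, ⟨y, Or.inl (Or.inr hy), rfl⟩, hi⟩
        · exact ⟨hx, _, ⟨y, Or.inr hy, rfl⟩, hi⟩
    · exact List.Nodup.filter _ (sorted_tokens_pairwise_lt.imp ne_of_lt)
    · exact nodup_foldl_union _ _ (nodup_foldl_union _ _ (nodup_foldl_union _ _ List.nodup_nil))
  · exact List.Pairwise.filter _ sorted_tokens_pairwise_lt

-- ===== VERDICT (by name: the statement is the Claim_ definition above) =====
theorem extract_runtime_hints_spec : Claim_equal_extract_runtime_hints := by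
  intro containers compose_files services _
  exact extract_runtime_hints_spec' containers compose_files services
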